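-- pv_equiv track=rewrite | github.com/yan-ren/programming-class | python_demo_programs/in-class-examples/practice_questions/min_abs_difference.py | unique_occurrances
-- ===== SOURCE A (Python) =====
-- def unique_occurrances(arr):
--     s = set()
--
--     for i in arr:
--         if i in s:
--             return False
--         else:
--             s.add(i)
--
--     return True
-- ===== SOURCE B (Python) =====
-- def unique_occurrances(arr):
--     a = sorted(arr)
--     return all(x != y for x, y in zip(a, a[1:]))
-- ===== Notes on version B (the rewrite author's own statement) =====
-- stated objective: alternative
-- what changed: Replaces the hash-set scan with early exit by a sort-based algorithm: sort the list and check that no two adjacent elements are equal.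
import Mathlib
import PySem

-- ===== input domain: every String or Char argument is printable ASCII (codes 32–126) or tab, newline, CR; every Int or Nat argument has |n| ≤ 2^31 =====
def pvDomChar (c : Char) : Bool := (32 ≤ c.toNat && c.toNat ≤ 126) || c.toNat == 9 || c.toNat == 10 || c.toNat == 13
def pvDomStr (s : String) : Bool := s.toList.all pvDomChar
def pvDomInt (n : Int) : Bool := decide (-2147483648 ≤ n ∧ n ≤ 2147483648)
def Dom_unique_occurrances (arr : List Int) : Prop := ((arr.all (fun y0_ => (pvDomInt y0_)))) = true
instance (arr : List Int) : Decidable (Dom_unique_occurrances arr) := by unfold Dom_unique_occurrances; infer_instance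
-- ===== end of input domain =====

-- B replaces A's hash-set scan with early exit by a sort-based check: sort the list and verify no two adjacent elements are equal (alternative algorithm, same result).

-- ===== PORT A =====
-- the for-loop over arr carrying the growing set s; returns False on the first repeat
def uniqueLoop (arr : List Int) (s : PySem.Set Int) : Bool :=
  match arr with
  | [] => true
  | i :: rest =>
    if PySem.Set.contains s i then false
    else uniqueLoop rest (PySem.Set.add s i)

def unique_occurrances (arr : List Int) : Bool :=
  uniqueLoop arr PySem.Set.empty

-- ===== PORT B =====
-- a = sorted(arr); all(x != y for x, y in zip(a, a[1:]))
def unique_occurrances_alt (arr : List Int) : Bool :=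
  let a := PySem.List.sorted arr (fun x => x) false
  (a.zip (PySem.List.slice a (some 1) none)).all (fun p => p.1 != p.2)

-- ===== PRECONDITION & SPEC =====
def Spec_unique_occurrances (arr : List Int) (out : Bool) : Prop := out = unique_occurrances_alt arr
instance (arr : List Int) (out : Bool) : Decidable (Spec_unique_occurrances arr out) := by unfold Spec_unique_occurrances; infer_instance

-- ===== CLAIM (what is proved, stated in full; the proofs are below) =====
def Claim_equal_unique_occurrances : Prop := ∀ (arr : List Int), Dom_unique_occurrances arr → Spec_unique_occurrances arr (unique_occurrances arr)

-- ===== LEMMAS AND PROOFS =====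

-- A's loop succeeds iff the remaining list has no duplicates and is disjoint from the set built so far
theorem uniqueLoop_iff (arr : List Int) : ∀ (s : PySem.Set Int),
    uniqueLoop arr s = true ↔ arr.Nodup ∧ ∀ x ∈ arr, x ∉ s := by
  induction arr with
  | nil => intro s; simp [uniqueLoop]
  | cons i rest ih =>
    intro s
    by_cases h : i ∈ s
    · simp only [uniqueLoop, (PySem.Set.contains_iff s i).mpr h, if_true]
      exact ⟨fun hf => by simp at hf, fun ⟨_, hall⟩ => absurd h (hall i (by simp))⟩
    · have hc : PySem.Set.contains s i = false :=
        Bool.eq_false_iff.mpr (fun hh => h ((PySem.Set.contains_iff s i).mp hh))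
      simp only [uniqueLoop, hc, Bool.false_eq_true, if_false, ih, List.nodup_cons,
        List.mem_cons, PySem.Set.mem_add]
      constructor
      · rintro ⟨hn, hall⟩
        refine ⟨⟨fun hi => (hall i hi) (Or.inr rfl), hn⟩, ?_⟩
        rintro x (rfl | hx)
        · exact h
        · intro hxs; exact hall x hx (Or.inl hxs)
      · rintro ⟨⟨hni, hn⟩, hall⟩
        refine ⟨hn, fun x hx hxs => ?_⟩
        rcases hxs with hxs' | rfl
        · exact hall x (Or.inr hx) hxs'
        · exact hni hx

-- on a ≤-sorted list, "no two adjacent elements are equal" is exactly Nodup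
theorem adj_all_iff (l : List Int) (h : l.Pairwise (· ≤ ·)) :
    ((l.zip (l.drop 1)).all (fun p => p.1 != p.2)) = true ↔ l.Nodup := by
  induction l with
  | nil => simp
  | cons x t ih =>
    cases t with
    | nil => simp
    | cons y t' =>
      have hpt : (y :: t').Pairwise (· ≤ ·) := (List.pairwise_cons.mp h).2
      have hx : ∀ z ∈ y :: t', x ≤ z := (List.pairwise_cons.mp h).1
      have hyt : ∀ z ∈ t', y ≤ z := (List.pairwise_cons.mp hpt).1
      simp only [List.drop_succ_cons, List.drop_zero, List.zip_cons_cons,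
        List.all_cons, Bool.and_eq_true, bne_iff_ne, ne_eq]
      rw [show List.drop 1 (y::t') = t' from rfl] at ih
      rw [ih hpt]
      constructor
      · rintro ⟨hxy, hn⟩
        have hxy' : x < y := lt_of_le_of_ne (hx y (by simp)) hxy
        refine List.nodup_cons.mpr ⟨?_, hn⟩
        intro hmem
        rcases List.mem_cons.mp hmem with rfl | hmem'
        · exact hxy rfl
        · exact absurd (hyt x hmem') (not_le.mpr hxy')
      · intro hn
        have := List.nodup_cons.mp hn
        exact ⟨fun he => this.1 (he ▸ List.mem_cons_self), this.2⟩

-- ===== VERDICT (by name: the statement is the Claim_ definition above) =====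
theorem unique_occurrances_spec : Claim_equal_unique_occurrances := by
  intro arr _
  unfold Spec_unique_occurrances
  rw [Bool.eq_iff_iff]
  have hA : unique_occurrances arr = true ↔ arr.Nodup := by
    unfold unique_occurrances
    rw [uniqueLoop_iff]
    simp [PySem.Set.empty]
  have hperm := PySem.List.sorted_perm arr (fun x : Int => x) false
  have hB : unique_occurrances_alt arr = true ↔ arr.Nodup := by
    unfold unique_occurrances_alt
    simp only []
    have hs1 : PySem.List.slice (PySem.List.sorted arr (fun x : Int => x) false) (some (1:Int)) none
        = (PySem.List.sorted arr (fun x : Int => x) false).drop 1 := by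
      simpa using PySem.List.slice_from_natCast (PySem.List.sorted arr (fun x : Int => x) false) 1
    rw [hs1, adj_all_iff _ (PySem.List.sorted_pairwise arr (fun x : Int => x))]
    exact hperm.nodup_iff
  rw [hA, hB]
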